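-- pv_equiv track=rewrite | github.com/vasivandrij656-arch/atlastrinity | src/brain/core/server/server.py | _categorize_place
-- ===== SOURCE A (Python) =====
-- def _categorize_place(types: list[str]) -> str:
--     """Categorize a place based on Google Maps types"""
--     if not types:
--         return "custom"
--
--     # Priority-based categorization
--     if any(t in types for t in ["restaurant", "cafe", "bar", "food"]):
--         return "restaurant"
--     if any(t in types for t in ["lodging", "hotel"]):
--         return "hotel"
--     if any(
--         t in types
--         for t in ["tourist_attraction", "museum", "park", "point_of_interest", "landmark"]
--     ):
--         return "attraction"
--     return "custom"
-- ===== SOURCE B (Python) =====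
-- _RANK = {
--     "restaurant": (0, "restaurant"),
--     "cafe": (0, "restaurant"),
--     "bar": (0, "restaurant"),
--     "food": (0, "restaurant"),
--     "lodging": (1, "hotel"),
--     "hotel": (1, "hotel"),
--     "tourist_attraction": (2, "attraction"),
--     "museum": (2, "attraction"),
--     "park": (2, "attraction"),
--     "point_of_interest": (2, "attraction"),
--     "landmark": (2, "attraction"),
-- }
--
--
-- def _categorize_place(types: list[str]) -> str:
--     best = None
--     for t in types:
--         r = _RANK.get(t)
--         if r is not None and (best is None or r[0] < best[0]):
--             best = r
--     return best[1] if best is not None else "custom"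
-- ===== Notes on version B (the rewrite author's own statement) =====
-- stated objective: alternative
-- what changed: Replaces A's three per-category-group membership scans over the input with a single pass over the input that looks each element up in a keyword-to-(priority,category) dictionary and keeps the lowest-priority match.
import Mathlib
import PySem

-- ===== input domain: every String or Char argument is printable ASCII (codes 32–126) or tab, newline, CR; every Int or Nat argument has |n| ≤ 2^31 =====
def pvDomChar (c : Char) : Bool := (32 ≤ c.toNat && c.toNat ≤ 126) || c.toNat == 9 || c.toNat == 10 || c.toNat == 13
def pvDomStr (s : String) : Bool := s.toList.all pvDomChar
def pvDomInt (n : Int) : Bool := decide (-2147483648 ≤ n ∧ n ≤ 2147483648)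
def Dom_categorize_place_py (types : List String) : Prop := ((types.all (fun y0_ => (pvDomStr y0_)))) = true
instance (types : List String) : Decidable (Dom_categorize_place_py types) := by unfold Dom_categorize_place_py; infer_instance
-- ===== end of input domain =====

-- B replaces A's three per-category membership scans by one pass over the input with a
-- keyword→(priority,category) dictionary and a best-priority accumulator (objective: alternative).


-- ===== PORT A =====
def categorize_place_py (types : List String) : String :=
  if types = [] then "custom"
  else if ["restaurant", "cafe", "bar", "food"].any (fun t => types.contains t) then "restaurant"
  else if ["lodging", "hotel"].any (fun t => types.contains t) then "hotel"
  else if ["tourist_attraction", "museum", "park", "point_of_interest", "landmark"].any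
      (fun t => types.contains t) then "attraction"
  else "custom"

-- ===== PORT B =====
def pvRank : PySem.Dict String (Int × String) :=
  PySem.Dict.ofList
    [("restaurant", (0, "restaurant")), ("cafe", (0, "restaurant")),
     ("bar", (0, "restaurant")), ("food", (0, "restaurant")),
     ("lodging", (1, "hotel")), ("hotel", (1, "hotel")),
     ("tourist_attraction", (2, "attraction")), ("museum", (2, "attraction")),
     ("park", (2, "attraction")), ("point_of_interest", (2, "attraction")),
     ("landmark", (2, "attraction"))]

def pvStep (best : Option (Int × String)) (t : String) : Option (Int × String) :=
  match pvRank.get? t with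
  | none => best
  | some r =>
    match best with
    | none => some r
    | some b => if r.1 < b.1 then some r else best

def categorize_place_py_alt (types : List String) : String :=
  match types.foldl pvStep none with
  | some b => b.2
  | none => "custom"

-- ===== PRECONDITION & SPEC =====
def Spec_categorize_place_py (types : List String) (out : String) : Prop := out = categorize_place_py_alt types
instance (types : List String) (out : String) : Decidable (Spec_categorize_place_py types out) := by unfold Spec_categorize_place_py; infer_instance

-- ===== CLAIM (what is proved, stated in full; the proofs are below) =====
def Claim_equal_categorize_place_py : Prop := ∀ (types : List String), Dom_categorize_place_py types → Spec_categorize_place_py types (categorize_place_py types)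

-- ===== LEMMAS AND PROOFS =====

-- canonical accumulator values, indexed by rank (3 = no match yet)
def pvG (n : Int) : Option (Int × String) :=
  if n = 0 then some (0, "restaurant")
  else if n = 1 then some (1, "hotel")
  else if n = 2 then some (2, "attraction")
  else none

-- numeric rank of one type string
def pvRk (t : String) : Int :=
  match pvRank.get? t with
  | none => 3
  | some r => r.1

lemma pvRank_mk : pvRank = PySem.Dict.mk
    [("restaurant", (0, "restaurant")), ("cafe", (0, "restaurant")),
     ("bar", (0, "restaurant")), ("food", (0, "restaurant")),
     ("lodging", (1, "hotel")), ("hotel", (1, "hotel")),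
     ("tourist_attraction", (2, "attraction")), ("museum", (2, "attraction")),
     ("park", (2, "attraction")), ("point_of_interest", (2, "attraction")),
     ("landmark", (2, "attraction"))] := by decide

lemma pvRank_cases (t : String) :
    pvRank.get? t =
      (if t ∈ ["restaurant", "cafe", "bar", "food"] then some ((0 : Int), "restaurant")
       else if t ∈ ["lodging", "hotel"] then some ((1 : Int), "hotel")
       else if t ∈ ["tourist_attraction", "museum", "park", "point_of_interest", "landmark"] then
         some ((2 : Int), "attraction")
       else none) := by
  rcases eq_or_ne t "restaurant" with rfl | h1; · decide
  rcases eq_or_ne t "cafe" with rfl | h2; · decide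
  rcases eq_or_ne t "bar" with rfl | h3; · decide
  rcases eq_or_ne t "food" with rfl | h4; · decide
  rcases eq_or_ne t "lodging" with rfl | h5; · decide
  rcases eq_or_ne t "hotel" with rfl | h6; · decide
  rcases eq_or_ne t "tourist_attraction" with rfl | h7; · decide
  rcases eq_or_ne t "museum" with rfl | h8; · decide
  rcases eq_or_ne t "park" with rfl | h9; · decide
  rcases eq_or_ne t "point_of_interest" with rfl | h10; · decide
  rcases eq_or_ne t "landmark" with rfl | h11; · decide
  rw [pvRank_mk]
  simp only [PySem.Dict.get?_mk_cons, beq_iff_eq]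
  rw [if_neg (Ne.symm h1), if_neg (Ne.symm h2), if_neg (Ne.symm h3), if_neg (Ne.symm h4),
    if_neg (Ne.symm h5), if_neg (Ne.symm h6), if_neg (Ne.symm h7), if_neg (Ne.symm h8),
    if_neg (Ne.symm h9), if_neg (Ne.symm h10), if_neg (Ne.symm h11)]
  simp [PySem.Dict.get?, h1, h2, h3, h4, h5, h6, h7, h8, h9, h10, h11]

lemma pvRk_bounds (t : String) : 0 ≤ pvRk t ∧ pvRk t ≤ 3 := by
  unfold pvRk; rw [pvRank_cases t]; split_ifs <;> norm_num

lemma pvStep_g (n : Int) (hn : 0 ≤ n ∧ n ≤ 3) (t : String) :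
    pvStep (pvG n) t = pvG (min n (pvRk t)) := by
  unfold pvStep pvRk
  rw [pvRank_cases t]
  obtain ⟨h0, h3⟩ := hn
  split_ifs <;> (interval_cases n <;> decide)

lemma pvFold_g (types : List String) : ∀ (n : Int), 0 ≤ n → n ≤ 3 →
    types.foldl pvStep (pvG n) = pvG (types.foldl (fun m t => min m (pvRk t)) n) := by
  induction types with
  | nil => intro n _ _; rfl
  | cons t ts ih =>
    intro n h0 h3
    have hrk := pvRk_bounds t
    simp only [List.foldl_cons]
    rw [pvStep_g n ⟨h0, h3⟩ t]
    exact ih (min n (pvRk t)) (le_min h0 hrk.1) (min_le_of_left_le h3)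

lemma pvFoldMin_le_iff (types : List String) : ∀ (a k : Int),
    types.foldl (fun m t => min m (pvRk t)) a ≤ k ↔ (a ≤ k ∨ ∃ t ∈ types, pvRk t ≤ k) := by
  induction types with
  | nil => intro a k; simp
  | cons t ts ih =>
    intro a k
    simp only [List.foldl_cons, ih, List.mem_cons]
    constructor
    · rintro (h | ⟨u, hu, hk⟩)
      · rcases (by omega : a ≤ k ∨ pvRk t ≤ k) with h' | h'
        · exact Or.inl h'
        · exact Or.inr ⟨t, Or.inl rfl, h'⟩
      · exact Or.inr ⟨u, Or.inr hu, hk⟩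
    · rintro (h | ⟨u, rfl | hu, hk⟩)
      · exact Or.inl (by omega)
      · exact Or.inl (by omega)
      · exact Or.inr ⟨u, hu, hk⟩

lemma pvFoldMin_nonneg (types : List String) : ∀ (a : Int), 0 ≤ a →
    0 ≤ types.foldl (fun m t => min m (pvRk t)) a := by
  induction types with
  | nil => intro a h; simpa using h
  | cons t ts ih =>
    intro a h
    simp only [List.foldl_cons]
    exact ih _ (le_min h (pvRk_bounds t).1)

lemma pvRk_le_zero_iff (t : String) :
    pvRk t ≤ 0 ↔ t ∈ ["restaurant", "cafe", "bar", "food"] := by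
  unfold pvRk; rw [pvRank_cases t]; split_ifs <;> simp_all

lemma pvRk_le_one_iff (t : String) :
    pvRk t ≤ 1 ↔ t ∈ ["restaurant", "cafe", "bar", "food"] ∨ t ∈ ["lodging", "hotel"] := by
  unfold pvRk; rw [pvRank_cases t]; split_ifs <;> simp_all

lemma pvRk_le_two_iff (t : String) :
    pvRk t ≤ 2 ↔ t ∈ ["restaurant", "cafe", "bar", "food"] ∨ t ∈ ["lodging", "hotel"] ∨
      t ∈ ["tourist_attraction", "museum", "park", "point_of_interest", "landmark"] := by
  unfold pvRk; rw [pvRank_cases t]; split_ifs <;> simp_all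

lemma pvAny_iff (G types : List String) :
    G.any (fun t => types.contains t) = true ↔ ∃ t ∈ types, t ∈ G := by
  simp only [List.any_eq_true, List.contains_iff_mem]
  exact ⟨fun ⟨k, hk, ht⟩ => ⟨k, ht, hk⟩, fun ⟨k, hk, ht⟩ => ⟨k, ht, hk⟩⟩

-- ===== VERDICT (by name: the statement is the Claim_ definition above) =====
theorem categorize_place_py_spec : Claim_equal_categorize_place_py := by
  intro types _
  unfold Spec_categorize_place_py categorize_place_py categorize_place_py_alt
  have hfold : types.foldl pvStep none =
      pvG (types.foldl (fun m t => min m (pvRk t)) 3) :=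
    pvFold_g types 3 (by norm_num) (by norm_num)
  rw [hfold]
  set m := types.foldl (fun m t => min m (pvRk t)) (3 : Int) with hm
  have hm3 : m ≤ 3 := by rw [hm, pvFoldMin_le_iff]; exact Or.inl le_rfl
  have hm0 : 0 ≤ m := pvFoldMin_nonneg types 3 (by norm_num)
  by_cases hnil : types = []
  · subst hnil; rfl
  rw [if_neg hnil]
  by_cases hR : (["restaurant", "cafe", "bar", "food"].any (fun t => types.contains t)) = true
  · rw [if_pos hR]
    have h0 : m = 0 := by
      obtain ⟨t, ht, hg⟩ := (pvAny_iff _ types).mp hR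
      have : m ≤ 0 := by
        rw [hm, pvFoldMin_le_iff]
        exact Or.inr ⟨t, ht, (pvRk_le_zero_iff t).mpr hg⟩
      omega
    rw [h0]; rfl
  rw [if_neg hR]
  have hnR : ¬ m ≤ 0 := by
    intro h
    apply hR
    rw [hm, pvFoldMin_le_iff] at h
    rcases h with h | ⟨t, ht, hk⟩
    · omega
    · exact (pvAny_iff _ types).mpr ⟨t, ht, (pvRk_le_zero_iff t).mp hk⟩
  by_cases hH : (["lodging", "hotel"].any (fun t => types.contains t)) = true
  · rw [if_pos hH]
    have h1 : m = 1 := by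
      obtain ⟨t, ht, hg⟩ := (pvAny_iff _ types).mp hH
      have : m ≤ 1 := by
        rw [hm, pvFoldMin_le_iff]
        exact Or.inr ⟨t, ht, (pvRk_le_one_iff t).mpr (Or.inr hg)⟩
      omega
    rw [h1]; rfl
  rw [if_neg hH]
  have hnH : ¬ m ≤ 1 := by
    intro h
    rw [hm, pvFoldMin_le_iff] at h
    rcases h with h | ⟨t, ht, hk⟩
    · omega
    · rcases (pvRk_le_one_iff t).mp hk with hg | hg
      · exact hR ((pvAny_iff _ types).mpr ⟨t, ht, hg⟩)
      · exact hH ((pvAny_iff _ types).mpr ⟨t, ht, hg⟩)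
  by_cases hA : (["tourist_attraction", "museum", "park", "point_of_interest", "landmark"].any
      (fun t => types.contains t)) = true
  · rw [if_pos hA]
    have h2 : m = 2 := by
      obtain ⟨t, ht, hg⟩ := (pvAny_iff _ types).mp hA
      have : m ≤ 2 := by
        rw [hm, pvFoldMin_le_iff]
        exact Or.inr ⟨t, ht, (pvRk_le_two_iff t).mpr (Or.inr (Or.inr hg))⟩
      omega
    rw [h2]; rfl
  rw [if_neg hA]
  have hnA : ¬ m ≤ 2 := by
    intro h
    rw [hm, pvFoldMin_le_iff] at h
    rcases h with h | ⟨t, ht, hk⟩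
    · omega
    · rcases (pvRk_le_two_iff t).mp hk with hg | hg | hg
      · exact hR ((pvAny_iff _ types).mpr ⟨t, ht, hg⟩)
      · exact hH ((pvAny_iff _ types).mpr ⟨t, ht, hg⟩)
      · exact hA ((pvAny_iff _ types).mpr ⟨t, ht, hg⟩)
  have h3 : m = 3 := by omega
  rw [h3]; rfl
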